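-- pv_equiv track=rewrite | github.com/DragonZ2013/Sem1_FP | pythonProject/main.py | gen_mat
-- ===== SOURCE A (Python) =====
-- def gen_mat(n):
--     #0-(n*n-1)
--     ''' n=4
--     3 2 1 0
--     7 6 5 4
--     11 10 9 8
--     15 14 13 12
--     n=5
--     4 3 2 1 0
--     9 8 7 6 5
--     14 13 12 11 10
--     19 18 17 16 15
--     24 23 22 21 20
--     '''
--     l=[]
--     for i in range(0,n):
--         lc=[]
--         for j in range(0,n):
--             lc.append(i*n+n-1-j)
--         l.append(lc)
--     return l
-- ===== SOURCE B (Python) =====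
-- def gen_mat(n):
--     if n <= 0:
--         return []
--     flat = list(range(n * n))
--     return [flat[i * n:(i + 1) * n][::-1] for i in range(n)]
-- ===== Notes on version B (the rewrite author's own statement) =====
-- stated objective: simpler
-- what changed: Builds the flat sequence 0..n*n-1 once, then reshapes it by slicing one row at a time and reversing the slice, instead of computing each cell with the i*n+n-1-j arithmetic in nested loops.
import Mathlib
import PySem

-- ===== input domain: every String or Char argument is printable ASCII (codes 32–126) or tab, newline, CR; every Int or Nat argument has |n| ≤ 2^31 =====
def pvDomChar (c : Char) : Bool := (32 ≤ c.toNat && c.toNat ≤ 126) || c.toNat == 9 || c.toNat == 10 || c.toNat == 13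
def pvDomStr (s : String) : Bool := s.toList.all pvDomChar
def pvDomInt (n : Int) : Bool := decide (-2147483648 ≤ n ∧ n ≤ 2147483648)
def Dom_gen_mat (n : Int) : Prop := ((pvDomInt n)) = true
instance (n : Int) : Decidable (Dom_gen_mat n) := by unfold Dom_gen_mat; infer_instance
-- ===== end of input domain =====

-- B builds the flat sequence 0..n*n-1 once and reshapes it by slicing and reversing each row,
-- instead of A's nested loops computing each cell via i*n+n-1-j (objective: simpler).

-- ===== PORT A =====
def gen_mat (n : Int) : List (List Int) :=
  (PySem.List.pyRange 0 n 1).foldl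
    (fun l i =>
      l ++ [(PySem.List.pyRange 0 n 1).foldl (fun lc j => lc ++ [i * n + n - 1 - j]) []])
    []

-- ===== PORT B =====
def gen_mat_alt (n : Int) : List (List Int) :=
  if n ≤ 0 then [] else
  let flat := PySem.List.pyRange 0 (n * n) 1
  (PySem.List.pyRange 0 n 1).map
    (fun i => ((PySem.List.slice? (PySem.List.slice flat (some (i * n)) (some ((i + 1) * n)))
                  none none (-1)).getD []))

-- ===== PRECONDITION & SPEC =====
def Spec_gen_mat (n : Int) (out : List (List Int)) : Prop := out = gen_mat_alt n
instance (n : Int) (out : List (List Int)) : Decidable (Spec_gen_mat n out) := by unfold Spec_gen_mat; infer_instance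

-- ===== CLAIM (what is proved, stated in full; the proofs are below) =====
def Claim_equal_gen_mat : Prop := ∀ (n : Int), Dom_gen_mat n → Spec_gen_mat n (gen_mat n)

-- ===== LEMMAS AND PROOFS =====

theorem foldl_append_map {α β : Type} (f : α → β) :
    ∀ (xs : List α) (acc : List β),
      xs.foldl (fun l x => l ++ [f x]) acc = acc ++ xs.map f := by
  intro xs
  induction xs with
  | nil => simp
  | cons x xs ih => intro acc; simp [List.foldl, ih]

-- A's row i, written as a map over the inner range
theorem gen_mat_eq_map (n : Int) :
    gen_mat n =
      (PySem.List.pyRange 0 n 1).map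
        (fun i => (PySem.List.pyRange 0 n 1).map (fun j => i * n + n - 1 - j)) := by
  unfold gen_mat
  rw [foldl_append_map]
  simp only [List.nil_append]
  apply List.map_congr_left
  intro i _
  rw [foldl_append_map]
  simp

-- the slice of the flat range is the contiguous sub-range
theorem slice_pyRange_row (n i : Int) (h0 : 0 ≤ i) (h1 : i < n) :
    PySem.List.slice (PySem.List.pyRange 0 (n * n) 1) (some (i * n)) (some ((i + 1) * n))
      = PySem.List.pyRange (i * n) ((i + 1) * n) 1 := by
  have hn : 0 < n := lt_of_le_of_lt h0 h1
  have ha : (0 : Int) ≤ i * n := mul_nonneg h0 (le_of_lt hn)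
  have hb : i * n ≤ (i + 1) * n := by nlinarith
  have hc : (i + 1) * n ≤ n * n := by nlinarith
  rw [PySem.List.slice_toNat]
  rw [PySem.List.pyRange_one_append 0 (i * n) (n * n) ha (le_trans hb hc)]
  rw [PySem.List.pyRange_one_append (i * n) ((i + 1) * n) (n * n) hb hc]
  have hlen1 : (PySem.List.pyRange 0 (i * n) 1).length = (i * n).toNat := by
    rw [PySem.List.length_pyRange_one]; omega
  have hlen2 : (PySem.List.pyRange (i * n) ((i + 1) * n) 1).length
      = ((i + 1) * n).toNat - (i * n).toNat := by
    rw [PySem.List.length_pyRange_one]; omega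
  rw [List.drop_left' hlen1, List.take_left' hlen2]
  · exact ha
  · exact le_trans ha hb

-- reversing the contiguous sub-range gives A's row
theorem reverse_row (n i : Int) (h0 : 0 ≤ i) (h1 : i < n) :
    (PySem.List.pyRange (i * n) ((i + 1) * n) 1).reverse
      = (PySem.List.pyRange 0 n 1).map (fun j => i * n + n - 1 - j) := by
  have h2 : PySem.List.pyRange ((i + 1) * n - 1) (i * n - 1) (-1)
      = (PySem.List.pyRange (i * n) ((i + 1) * n) 1).reverse := by
    rw [PySem.List.pyRange_neg_one_eq_reverse]
    norm_num
  rw [← h2, PySem.List.pyRange_neg_one, PySem.List.pyRange_one]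
  have : ((i + 1) * n - 1 - (i * n - 1)).toNat = (n - 0).toNat := by
    have : (i + 1) * n - 1 - (i * n - 1) = n := by ring
    rw [this]; omega
  rw [this]
  rw [List.map_map]
  apply List.map_congr_left
  intro k _
  simp only [Function.comp]
  ring

theorem gen_mat_spec' (n : Int) : gen_mat n = gen_mat_alt n := by
  rw [gen_mat_eq_map]
  unfold gen_mat_alt
  split
  · next h => rw [PySem.List.pyRange_one_eq_nil h, List.map_nil]
  apply List.map_congr_left
  intro i hi
  rw [PySem.List.mem_pyRange_one] at hi
  rw [slice_pyRange_row n i hi.1 hi.2, PySem.List.slice?_none_none_neg_one,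
    Option.getD_some, reverse_row n i hi.1 hi.2]

-- ===== VERDICT (by name: the statement is the Claim_ definition above) =====
theorem gen_mat_spec : Claim_equal_gen_mat := by
  intro n _
  exact gen_mat_spec' n
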